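-- pv_equiv track=rewrite | github.com/Sburi/Functions_Python | f_PopShift.py | pop_shift
-- ===== SOURCE A (Python) =====
-- def pop_shift(str):
--     ostr = list(str)
--     str1 = ""
--     str2 = ""
--     while len(ostr)>1:
--         max = len(ostr)-1
--         str1 = str1 + ostr[max]
--         ostr.pop(max)
--         if max > 2:
--             str2 = str2 + ostr[0]
--             ostr.pop(0)
--     return [str1, str2, ostr[0]]
-- ===== SOURCE B (Python) =====
-- def pop_shift(str):
--     s = list(str)
--     n = len(s)
--     L = max(0, (n - 2) // 2)
--     return ["".join(s[L+1:][::-1]), "".join(s[:L]), s[L]]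
-- ===== Notes on version B (the rewrite author's own statement) =====
-- stated objective: faster
-- what changed: Replaced the iterative both-ends popping loop by closed-form index arithmetic: compute the left-peel count L = max(0,(n-2)//2) once and build the result directly from slices (right part reversed, left part, middle element).
import Mathlib
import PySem

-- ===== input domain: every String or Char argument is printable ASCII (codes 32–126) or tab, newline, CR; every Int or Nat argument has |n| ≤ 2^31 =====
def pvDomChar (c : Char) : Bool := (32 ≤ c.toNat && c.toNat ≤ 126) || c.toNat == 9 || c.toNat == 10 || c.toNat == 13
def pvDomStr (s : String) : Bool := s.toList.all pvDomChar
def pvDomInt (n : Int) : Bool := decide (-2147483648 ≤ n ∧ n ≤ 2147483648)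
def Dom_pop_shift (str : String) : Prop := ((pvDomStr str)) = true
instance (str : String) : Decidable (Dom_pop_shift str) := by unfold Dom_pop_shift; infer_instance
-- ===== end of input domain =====

-- B replaces A's iterative both-ends popping loop by closed-form index arithmetic over slices (simpler).
-- ===== PORT A =====
-- the while loop: state (ostr, str1, str2); pop last into str1, and when max > 2 also pop first into str2
def popLoop (ostr : List Char) (s1 s2 : String) : String × String × List Char :=
  if _h : 1 < ostr.length then
    let m := ostr.length - 1
    let s1' := s1 ++ String.mk [ostr.getD m ' ']      -- str1 = str1 + ostr[max] (index always in range)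
    let ostr' := ostr.take m                          -- ostr.pop(max): drop last element
    if 2 < m then
      popLoop (ostr'.drop 1) s1' (s2 ++ String.mk [ostr'.getD 0 ' '])  -- str2 += ostr[0]; ostr.pop(0)
    else
      popLoop ostr' s1' s2
  else (s1, s2, ostr)
termination_by ostr.length
decreasing_by
  · simp; omega
  · simp; omega

def pop_shift (str : String) : List String :=
  let r := popLoop str.toList "" ""
  [r.1, r.2.1, String.mk [r.2.2.getD 0 ' ']]          -- ostr[0] (in range whenever str ≠ "")

-- ===== PORT B =====
def pop_shift_alt (str : String) : List String :=
  let s := str.toList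
  let n : Int := s.length
  let L : Nat := (max 0 (PySem.Int.floordiv (n - 2) 2)).toNat   -- L = max(0,(n-2)//2), a nonnegative index
  [String.mk ((s.drop (L + 1)).reverse),              -- "".join(s[L+1:][::-1])
   String.mk (s.take L),                              -- "".join(s[:L])
   String.mk [s.getD L ' ']]                          -- s[L] (in range whenever str ≠ "")

-- ===== PRECONDITION & SPEC =====
-- Both A and B raise IndexError on the empty string (indexing the middle element); Pre_ excludes exactly it.
def Pre_pop_shift (str : String) : Prop := str ≠ ""
instance (str : String) : Decidable (Pre_pop_shift str) := by unfold Pre_pop_shift; infer_instance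
def pvWitness_pop_shift : String := "abcde"
def Spec_pop_shift (str : String) (out : List String) : Prop := out = pop_shift_alt str
instance (str : String) (out : List String) : Decidable (Spec_pop_shift str out) := by unfold Spec_pop_shift; infer_instance

-- ===== CLAIM (what is proved, stated in full; the proofs are below) =====
def Claim_equal_pop_shift : Prop := ∀ (str : String), Dom_pop_shift str → Pre_pop_shift str → Spec_pop_shift str (pop_shift str)

-- ===== LEMMAS AND PROOFS =====

theorem toList_mk (a : List Char) : (String.mk a).toList = a :=
  Eq.symm (String.ofList_eq.mp rfl)

theorem mk_append (a b : List Char) : String.mk (a ++ b) = String.mk a ++ String.mk b := by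
  have h : (String.mk (a ++ b)).toList = (String.mk a ++ String.mk b).toList := by
    simp [toList_mk]
  exact String.toList_injective h

-- the left-peel count as a Nat function of the length
def Lnat (n : Nat) : Nat := (n - 2) / 2

theorem Lnat_eq (n : Nat) :
    (max 0 (PySem.Int.floordiv ((n : Int) - 2) 2)).toNat = Lnat n := by
  unfold Lnat
  rcases n with _ | _ | m
  · decide
  · decide
  · have h2 : ((m + 2 : Nat) : Int) - 2 = ((m : Nat) : Int) := by push_cast; ring
    rw [h2, show (2 : Int) = ((2 : Nat) : Int) from rfl, PySem.Int.floordiv_natCast m 2]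
    simp
    omega

-- peeling the last element off a drop
theorem drop_decomp (xs : List Char) (j : Nat) (h1 : 1 ≤ xs.length) (hj : j ≤ xs.length - 1) :
    xs.drop j = (xs.take (xs.length - 1)).drop j ++ [xs.getD (xs.length - 1) ' '] := by
  have hne : xs ≠ [] := by intro h; simp [h] at h1
  have hlt : xs.length - 1 < xs.length := by omega
  conv_lhs => rw [← List.dropLast_append_getLast hne]
  rw [List.dropLast_eq_take, List.drop_append_of_le_length (by simp; omega),
      List.getD_eq_getElem xs ' ' hlt, List.getLast_eq_getElem]

-- peeling the first element off a take
theorem take_decomp (xs : List Char) (j : Nat) (h1 : 1 ≤ xs.length) :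
    xs.take (j + 1) = xs.getD 0 ' ' :: (xs.drop 1).take j := by
  cases xs with
  | nil => simp at h1
  | cons c t => simp

theorem mk_nil : String.mk ([] : List Char) = "" := rfl

theorem append_mk_nil (s : String) : s ++ String.mk ([] : List Char) = s := by
  rw [mk_nil]; simp

theorem popLoop_spec : ∀ n (xs : List Char) (s1 s2 : String), xs.length = n → 1 ≤ n →
    popLoop xs s1 s2 = (s1 ++ String.mk ((xs.drop (Lnat n + 1)).reverse),
                        s2 ++ String.mk (xs.take (Lnat n)),
                        (xs.drop (Lnat n)).take 1) := by
  intro n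
  induction n using Nat.strong_induction_on with
  | _ n ih =>
    intro xs s1 s2 hlen hn
    rw [popLoop]
    by_cases hlen1 : 1 < xs.length
    · rw [dif_pos hlen1]
      set m := xs.length - 1 with hm
      by_cases hm2 : 2 < m
      · -- n ≥ 4: pop both ends, recurse on length n - 2
        rw [if_pos hm2]
        have hys : ((xs.take m).drop 1).length = n - 2 := by simp; omega
        rw [ih (n - 2) (by omega) _ _ _ hys (by omega)]
        have hk : Lnat n = Lnat (n - 2) + 1 := by unfold Lnat; omega
        set k := Lnat (n - 2) with hkdef
        have hkm : k + 2 ≤ m := by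
          have : k = (n - 4) / 2 := by rw [hkdef]; unfold Lnat; omega
          omega
        refine Prod.ext ?_ (Prod.ext ?_ ?_)
        · -- first component
          simp only [hk]
          rw [drop_decomp xs (k + 2) (by omega) (by omega)]
          rw [List.reverse_append, List.reverse_singleton, ← hm]
          rw [mk_append, ← String.append_assoc, List.drop_drop,
              show 1 + (k + 1) = k + 2 from by omega]
        · -- second component
          simp only [hk]
          rw [take_decomp xs k (by omega)]
          have h0 : (xs.take m).getD 0 ' ' = xs.getD 0 ' ' := by
            rw [List.getD_eq_getElem _ ' ' (by simp; omega),
                List.getD_eq_getElem _ ' ' (by omega)]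
            simp
          rw [h0]
          show _ = _ ++ String.mk ([xs.getD 0 ' '] ++ (xs.drop 1).take k)
          rw [mk_append, ← String.append_assoc]
          congr 2
          rw [List.drop_take, List.take_take]
          congr 1
          omega
        · -- third component
          simp only [hk]
          rw [List.drop_drop, Nat.add_comm 1 k, List.drop_take, List.take_take]
          congr 1
          omega
      · -- n = 2 or 3: only the right end is popped, recurse on length n - 1
        rw [if_neg hm2]
        have hxs' : (xs.take m).length = n - 1 := by simp; omega
        rw [ih (n - 1) (by omega) _ _ _ hxs' (by omega)]
        have hL : Lnat n = 0 := by unfold Lnat; omega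
        have hL' : Lnat (n - 1) = 0 := by unfold Lnat; omega
        rw [hL, hL']
        simp only [Nat.zero_add]
        refine Prod.ext ?_ (Prod.ext ?_ ?_)
        · rw [drop_decomp xs 1 (by omega) (by omega)]
          rw [List.reverse_append, List.reverse_singleton, ← hm,
              mk_append, ← String.append_assoc]
        · simp
        · simp only [List.drop_zero, List.take_take]
          congr 1
          omega
    · rw [dif_neg hlen1]
      have hn1 : n = 1 := by omega
      subst hn1
      have hL : Lnat 1 = 0 := by decide
      rw [hL]
      have hxs : xs.take 1 = xs := by rw [List.take_of_length_le (by omega)]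
      refine Prod.ext ?_ (Prod.ext ?_ ?_)
      · rw [List.drop_of_length_le (by omega), List.reverse_nil, append_mk_nil]
      · rw [List.take_zero, append_mk_nil]
      · simp [hxs]

-- ===== VERDICT (by name: the statement is the Claim_ definition above) =====
theorem pop_shift_spec : Claim_equal_pop_shift := by
  intro str _hdom hpre
  unfold Spec_pop_shift
  have hne : str.toList ≠ [] := fun h => hpre (String.toList_eq_nil_iff.mp h)
  have hn : 1 ≤ str.toList.length := by
    cases h : str.toList with
    | nil => exact absurd h hne
    | cons c t => simp
  simp only [pop_shift, pop_shift_alt]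
  rw [popLoop_spec str.toList.length str.toList "" "" rfl hn, Lnat_eq]
  have hLlt : Lnat str.toList.length < str.toList.length := by unfold Lnat; omega
  simp only [String.empty_append]
  congr 1
  congr 1
  congr 1
  -- third component: ((xs.drop L).take 1).getD 0 = xs.getD L
  have h1 : 0 < ((str.toList.drop (Lnat str.toList.length)).take 1).length := by
    rw [List.length_take, List.length_drop]; omega
  rw [List.getD_eq_getElem _ ' ' h1, List.getD_eq_getElem _ ' ' hLlt]
  simp
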